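-- pv_equiv track=rewrite | github.com/advikag/comp110-21f-workspace | exercises/ex07/data_utils.py | head
-- ===== SOURCE A (Python) =====
-- def head(columnt: dict[str, list[str]], num: int) -> dict[str, list[str]]:
--     """Produce a new column based table."""
--     ans: dict[str, list[str]] = {}
--     for column in columnt:
--         first: list[str] = list()
--         if num >= len(columnt[column]):
--             return columnt
--         else:
--             i: int = 0
--             while i < num:
--                 first.append(columnt[column][i])
--                 i += 1
--         ans[column] = first
--
--     return ans
-- ===== SOURCE B (Python) =====
-- def head(columnt: dict[str, list[str]], num: int) -> dict[str, list[str]]: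
--     """Produce a new column based table."""
--     vals = list(columnt.values())
--     if vals and min(len(v) for v in vals) <= num:
--         return columnt
--     keys = list(columnt)
--     rows = [[v[i] for v in vals] for i in range(num)]
--     return {k: [row[j] for row in rows] for j, k in enumerate(keys)}
-- ===== Notes on version B (the rewrite author's own statement) =====
-- stated objective: alternative
-- what changed: A decides and builds in one column-wise pass with an early return and an inner index while-loop; B decides once via the minimum column length and then builds row-major: it materialises the first num rows of the table and transposes them back into columns with an enumerate-indexed dict comprehension.
import Mathlib
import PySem

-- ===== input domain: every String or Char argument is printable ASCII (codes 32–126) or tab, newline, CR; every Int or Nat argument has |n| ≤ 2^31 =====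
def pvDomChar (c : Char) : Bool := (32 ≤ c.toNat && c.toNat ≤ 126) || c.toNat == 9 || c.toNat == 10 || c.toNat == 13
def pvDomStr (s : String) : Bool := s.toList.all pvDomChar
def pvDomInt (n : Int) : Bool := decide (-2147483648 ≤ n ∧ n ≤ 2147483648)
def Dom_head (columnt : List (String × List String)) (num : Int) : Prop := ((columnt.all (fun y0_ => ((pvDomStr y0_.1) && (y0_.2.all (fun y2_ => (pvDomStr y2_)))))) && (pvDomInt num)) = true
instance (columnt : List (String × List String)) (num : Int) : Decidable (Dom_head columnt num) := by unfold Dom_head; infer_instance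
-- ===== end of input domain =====

-- B replaces A's interleaved decide-and-build column pass (early return + inner index while-loop)
-- by a min-length decision followed by a row-major build: it materialises the first num ROWS of the
-- table and then transposes them back into columns; objective: alternative (same cost). In the
-- short-column case both return the input dict object itself (return value proved equal here).

-- ===== PORT A =====
-- the inner 'while i < num: first.append(columnt[column][i]); i += 1' loop
def headWhile (lst : List String) (num : Int) (i : Int) (first : List String) : List String :=
  if i < num then
    headWhile lst num (i + 1) (first ++ [(PySem.List.pyGet? lst i).getD ""])
  else first
termination_by (num - i).toNat
decreasing_by omega

-- 'for column in columnt: …' — a Python dict's keys are distinct, so iterating the keys and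
-- looking each one up is iterating the (key, value) pairs, and 'ans[column] = first' on the
-- fresh dict ans (whose keys are a subset of those distinct keys) appends a new entry.
def headLoop (columnt : List (String × List String)) (num : Int)
    (rest : List (String × List String)) (ans : List (String × List String)) :
    List (String × List String) :=
  match rest with
  | [] => ans
  | (column, v) :: rest =>
    if num ≥ (v.length : Int) then columnt
    else headLoop columnt num rest (ans ++ [(column, headWhile v num 0 [])])

def head (columnt : List (String × List String)) (num : Int) : List (String × List String) :=
  headLoop columnt num columnt []

-- ===== PORT B =====
def head_alt (columnt : List (String × List String)) (num : Int) : List (String × List String) :=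
  let vals := columnt.map Prod.snd
  -- 'if vals and min(len(v) for v in vals) <= num: return columnt'
  if vals ≠ [] ∧ (PySem.List.min? (vals.map fun v => PySem.List.len v) id).getD 0 ≤ num then
    columnt
  else
    let keys := columnt.map Prod.fst
    -- 'rows = [[v[i] for v in vals] for i in range(num)]' (each v[i] is in range here)
    let rows := (PySem.List.pyRange 0 num).map (fun i => vals.map (fun v => PySem.List.pyGetD v i ""))
    -- '{k: [row[j] for row in rows] for j, k in enumerate(keys)}' — the keys of a Python dict
    -- are distinct, so the dict comprehension appends one entry per key
    (PySem.List.enumerate keys).map (fun jk => (jk.2, rows.map (fun row => PySem.List.pyGetD row jk.1 "")))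

-- ===== PRECONDITION & SPEC =====
def Spec_head (columnt : List (String × List String)) (num : Int) (out : List (String × List String)) : Prop := out = head_alt columnt num
instance (columnt : List (String × List String)) (num : Int) (out : List (String × List String)) : Decidable (Spec_head columnt num out) := by unfold Spec_head; infer_instance

-- ===== CLAIM (what is proved, stated in full; the proofs are below) =====
def Claim_equal_head : Prop := ∀ (columnt : List (String × List String)) (num : Int), Dom_head columnt num → Spec_head columnt num (head columnt num)

-- ===== LEMMAS AND PROOFS =====

lemma headWhile_eq (lst : List String) (num : Int) :
    ∀ (k : Nat) (i : Int) (first : List String), 0 ≤ i → num ≤ (lst.length : Int) →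
    (num - i).toNat = k →
    headWhile lst num i first = first ++ (lst.drop i.toNat).take (num - i).toNat := by
  intro k
  induction k with
  | zero =>
    intro i first hi hlen hk
    rw [headWhile]
    have : ¬ i < num := by omega
    simp [this, hk]
  | succ k ih =>
    intro i first hi hlen hk
    rw [headWhile]
    have hlt : i < num := by omega
    have hidx : i.toNat < lst.length := by omega
    have hget : PySem.List.pyGet? lst i = some lst[i.toNat] := by
      simp only [PySem.List.pyGet?, PySem.List.pyIdx?]
      rw [if_pos hi, if_pos (show i < (lst.length : Int) by omega)]
      simp [List.getElem?_eq_getElem hidx]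
    rw [if_pos hlt, ih (i + 1) _ (by omega) hlen (by omega), hget]
    have hdrop : lst.drop i.toNat = lst[i.toNat] :: lst.drop (i.toNat + 1) :=
      List.drop_eq_getElem_cons hidx
    have h1 : (i + 1).toNat = i.toNat + 1 := by omega
    have h2 : (num - i).toNat = (num - (i + 1)).toNat + 1 := by omega
    rw [h1, h2, hdrop, List.take_succ_cons, List.append_assoc]
    simp

-- A's loop, characterised: return the input at the first short column, else columns truncated.
lemma headLoop_eq (columnt : List (String × List String)) (num : Int) :
    ∀ (rest ans : List (String × List String)),
    headLoop columnt num rest ans =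
      if rest.any (fun p => decide (num ≥ (p.2.length : Int))) then columnt
      else ans ++ rest.map (fun p => (p.1, p.2.take num.toNat)) := by
  intro rest
  induction rest with
  | nil => intro ans; simp [headLoop]
  | cons p rest ih =>
    intro ans
    obtain ⟨c, v⟩ := p
    by_cases h : num ≥ (v.length : Int)
    · simp [headLoop, h]
    · have hlen : num ≤ (v.length : Int) := by omega
      have hw : headWhile v num 0 [] = v.take num.toNat := by
        rw [headWhile_eq v num (num - 0).toNat 0 [] le_rfl hlen rfl]
        simp
      simp only [headLoop, if_neg h, ih, List.any_cons]
      have hd : decide (num ≥ (v.length : Int)) = false := by simp [h]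
      simp only [hd, hw, List.append_assoc]
      rw [Bool.false_or, List.map_cons]
      rfl

-- A's early-return test and B's min-length test agree.
lemma decision_iff (columnt : List (String × List String)) (num : Int) :
    (columnt.any (fun p => decide (num ≥ (p.2.length : Int))) = true) ↔
    (columnt.map Prod.snd ≠ [] ∧
      (PySem.List.min? ((columnt.map Prod.snd).map fun v => PySem.List.len v) id).getD 0 ≤ num) := by
  set ls := (columnt.map Prod.snd).map (fun v => PySem.List.len v) with hls
  constructor
  · intro h
    obtain ⟨p, hp, hdec⟩ := List.any_eq_true.mp h
    have hcne : columnt ≠ [] := by rintro rfl; simp at hp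
    have hlsne : ls ≠ [] := by simp [hls, hcne]
    obtain ⟨m, hm⟩ : ∃ m, PySem.List.min? ls id = some m := by
      cases h' : PySem.List.min? ls id with
      | none => exact absurd ((PySem.List.min?_eq_none_iff _ _).mp h') hlsne
      | some m => exact ⟨m, rfl⟩
    refine ⟨by simp [hcne], ?_⟩
    have hmem : PySem.List.len p.2 ∈ ls := by
      simp [hls]; exact ⟨p.1, p.2, hp, rfl⟩
    have := PySem.List.min?_isMin hm _ hmem
    simp only [hm, Option.getD_some, id] at *
    simp only [decide_eq_true_eq] at hdec
    simp [PySem.List.len] at this ⊢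
    omega
  · rintro ⟨hne, hle⟩
    have hlsne : ls ≠ [] := by simp [hls]; intro h; simp [h] at hne
    obtain ⟨m, hm⟩ : ∃ m, PySem.List.min? ls id = some m := by
      cases h' : PySem.List.min? ls id with
      | none => exact absurd ((PySem.List.min?_eq_none_iff _ _).mp h') hlsne
      | some m => exact ⟨m, rfl⟩
    rw [hm, Option.getD_some] at hle
    have hmem := PySem.List.min?_mem hm
    simp only [hls, List.mem_map] at hmem
    obtain ⟨v, ⟨p, hp, rfl⟩, rfl⟩ := hmem
    refine List.any_eq_true.mpr ⟨p, hp, ?_⟩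
    simp [PySem.List.len] at hle ⊢
    omega

-- One truncated column, produced row-wise: reading index i for i in range(num) is take.
lemma take_eq_map_pyRange (w : List String) (num : Int) (h : num ≤ (w.length : Int)) :
    (PySem.List.pyRange 0 num).map (fun i => PySem.List.pyGetD w i "") = w.take num.toNat := by
  by_cases hn : num ≤ 0
  · have h1 : PySem.List.pyRange 0 num = [] := by
      simp [PySem.List.pyRange]; omega
    have h2 : num.toNat = 0 := by omega
    simp [h1, h2]
  · have hcast : num = (num.toNat : Int) := by omega
    rw [hcast]
    apply List.ext_getElem
    · simp [PySem.List.length_pyRange_one]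
      omega
    · intro k hk1 hk2
      have hkn : k < num.toNat := by
        have := hk1
        simp [PySem.List.length_pyRange_one] at this
        omega
      have hkw : k < w.length := by omega
      have h3 := PySem.List.getElem?_map_pyRange_zero (fun i => PySem.List.pyGetD w i "") num.toNat k hkn
      rw [List.getElem?_eq_getElem hk1] at h3
      have h4 : ((PySem.List.pyRange 0 (num.toNat:Int)).map (fun i => PySem.List.pyGetD w i ""))[k] = PySem.List.pyGetD w (k:Int) "" := Option.some.inj h3
      rw [h4, PySem.List.pyGetD_natCast, List.getElem_take, List.getD_eq_getElem _ _ hkw]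

-- The build branch of B equals the build branch of A.
lemma build_eq (columnt : List (String × List String)) (num : Int)
    (h : ∀ p ∈ columnt, num < ((p.2 : List String).length : Int)) :
    (PySem.List.enumerate (columnt.map Prod.fst)).map
        (fun jk => (jk.2,
          ((PySem.List.pyRange 0 num).map
              (fun i => (columnt.map Prod.snd).map (fun v => PySem.List.pyGetD v i ""))).map
            (fun row => PySem.List.pyGetD row jk.1 ""))) =
      columnt.map (fun p => (p.1, p.2.take num.toNat)) := by
  apply List.ext_getElem
  · simp [PySem.List.length_enumerate]
  · intro j hj1 hj2
    have hjc : j < columnt.length := by simpa using hj2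
    rw [List.getElem_map, List.getElem_map, PySem.List.getElem_enumerate]
    simp only [zero_add, List.getElem_map, List.map_map, Function.comp_def]
    have hstep : ∀ i : Int,
        PySem.List.pyGetD (columnt.map (fun p => PySem.List.pyGetD p.2 i "")) (j:Int) ""
          = PySem.List.pyGetD (columnt[j].2) i "" := by
      intro i
      rw [PySem.List.pyGetD_natCast, List.getD_eq_getElem _ _ (by simpa using hjc)]
      simp
    refine Prod.ext rfl ?_
    simp only [hstep]
    exact take_eq_map_pyRange _ num (by have := h columnt[j] (List.getElem_mem hjc); omega)

theorem head_spec_aux (columnt : List (String × List String)) (num : Int) :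
    head columnt num = head_alt columnt num := by
  unfold head head_alt
  rw [headLoop_eq]
  by_cases h : columnt.any (fun p => decide (num ≥ ((p.2 : List String).length : Int))) = true
  · rw [if_pos h, if_pos ((decision_iff columnt num).mp h)]
  · rw [if_neg (fun hh => h hh), List.nil_append,
      if_neg (fun hc => h ((decision_iff columnt num).mpr hc))]
    have hall : ∀ p ∈ columnt, num < ((p.2 : List String).length : Int) := by
      intro p hp
      by_contra hx
      exact h (List.any_eq_true.mpr ⟨p, hp, by simp; omega⟩)
    exact (build_eq columnt num hall).symm

-- ===== VERDICT (by name: the statement is the Claim_ definition above) =====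
theorem head_spec : Claim_equal_head := by
  intro columnt num _
  unfold Spec_head
  exact head_spec_aux columnt num
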